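-- pv_equiv track=rewrite | github.com/eliottcassidy2000/math | 04-computation/projective_algebraic_deep2_S71n.py | arc_index
-- ===== SOURCE A (Python) =====
-- def arc_index(i, j, n):
--     """Get the bit index for arc (i,j) with i<j"""
--     idx = 0
--     for a in range(n):
--         for b in range(a+1, n):
--             if a == i and b == j:
--                 return idx
--             idx += 1
--     return -1
-- ===== SOURCE B (Python) =====
-- def arc_index(i, j, n):
--     """Get the bit index for arc (i,j) with i<j"""
--     if 0 <= i < j < n:
--         return i * (n - 1) - i * (i - 1) // 2 + (j - i - 1)
--     return -1
-- ===== Notes on version B (the rewrite author's own statement) =====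
-- stated objective: faster
-- what changed: Replaced the O(n^2) nested scan over all pairs by the closed-form rank i*(n-1) - i*(i-1)//2 + (j-i-1) guarded by the range check 0 <= i < j < n (else -1).
import Mathlib
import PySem

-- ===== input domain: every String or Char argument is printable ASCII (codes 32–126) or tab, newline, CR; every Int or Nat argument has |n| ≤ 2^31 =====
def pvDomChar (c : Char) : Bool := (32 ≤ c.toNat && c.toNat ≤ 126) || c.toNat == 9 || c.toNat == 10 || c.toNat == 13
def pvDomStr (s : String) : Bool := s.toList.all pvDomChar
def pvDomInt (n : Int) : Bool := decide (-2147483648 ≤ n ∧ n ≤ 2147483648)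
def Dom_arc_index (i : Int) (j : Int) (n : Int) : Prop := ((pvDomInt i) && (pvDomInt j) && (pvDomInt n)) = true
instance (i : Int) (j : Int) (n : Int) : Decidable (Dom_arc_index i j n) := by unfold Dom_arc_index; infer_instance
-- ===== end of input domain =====

-- B replaces A's O(n^2) nested scan by the O(1) closed-form rank with a range check.

-- ===== PORT A =====
-- inner loop: 'for b in range(a+1, n): if a == i and b == j: return idx; idx += 1'
-- .inl r = early return with value r, .inr idx = loop finished with updated idx
def arcInner (i j a : Int) : List Int → Int → Int ⊕ Int
  | [], idx => .inr idx
  | b :: bs, idx => if a = i ∧ b = j then .inl idx else arcInner i j a bs (idx + 1)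

-- outer loop: 'for a in range(n): …' threading idx, final 'return -1'
def arcOuter (i j n : Int) : List Int → Int → Int
  | [], _ => -1
  | a :: as, idx =>
    match arcInner i j a (PySem.List.pyRange (a + 1) n 1) idx with
    | .inl r => r
    | .inr idx' => arcOuter i j n as idx'

def arc_index (i : Int) (j : Int) (n : Int) : Int :=
  arcOuter i j n (PySem.List.pyRange 0 n 1) 0

-- ===== PORT B =====
def arc_index_alt (i : Int) (j : Int) (n : Int) : Int :=
  if 0 ≤ i ∧ i < j ∧ j < n then
    i * (n - 1) - PySem.Int.floordiv (i * (i - 1)) 2 + (j - i - 1)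
  else -1

-- ===== PRECONDITION & SPEC =====
def Spec_arc_index (i : Int) (j : Int) (n : Int) (out : Int) : Prop := out = arc_index_alt i j n
instance (i : Int) (j : Int) (n : Int) (out : Int) : Decidable (Spec_arc_index i j n out) := by unfold Spec_arc_index; infer_instance

-- ===== CLAIM (what is proved, stated in full; the proofs are below) =====
def Claim_equal_arc_index : Prop := ∀ (i : Int) (j : Int) (n : Int), Dom_arc_index i j n → Spec_arc_index i j n (arc_index i j n)

-- ===== LEMMAS AND PROOFS =====


theorem arcInner_spec (i j n : Int) : ∀ (k : Nat) (a s idx : Int), (n - s).toNat = k →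
    arcInner i j a (PySem.List.pyRange s n 1) idx =
      (if a = i ∧ s ≤ j ∧ j < n then Sum.inl (idx + (j - s)) else Sum.inr (idx + max 0 (n - s))) := by
  intro k
  induction k with
  | zero =>
    intro a s idx hk
    rw [PySem.List.pyRange_one_eq_nil (by omega)]
    simp only [arcInner]
    have hcond : ¬ (a = i ∧ s ≤ j ∧ j < n) := by omega
    rw [if_neg hcond]
    congr 1
    omega
  | succ k ih =>
    intro a s idx hk
    rw [PySem.List.pyRange_one_cons (by omega)]
    simp only [arcInner]
    by_cases h1 : a = i ∧ s = j
    · rw [if_pos h1, if_pos (by omega)]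
      congr 1
      omega
    · rw [if_neg h1, ih a (s + 1) (idx + 1) (by omega)]
      by_cases h2 : a = i ∧ s + 1 ≤ j ∧ j < n
      · rw [if_pos h2, if_pos (by omega)]
        congr 1
        omega
      · rw [if_neg h2, if_neg (by omega)]
        congr 1
        omega

theorem arcOuter_spec (i j n : Int) : ∀ (k : Nat) (s idx : Int), (n - s).toNat = k →
    arcOuter i j n (PySem.List.pyRange s n 1) idx =
      (if s ≤ i ∧ i < j ∧ j < n then
        idx + (i - s) * (n - 1) - (i * (i - 1) - s * (s - 1)) / 2 + (j - i - 1)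
      else -1) := by
  intro k
  induction k with
  | zero =>
    intro s idx hk
    rw [PySem.List.pyRange_one_eq_nil (by omega), if_neg (by omega)]
    rfl
  | succ k ih =>
    intro s idx hk
    rw [PySem.List.pyRange_one_cons (by omega)]
    simp only [arcOuter]
    rw [arcInner_spec i j n (n - (s + 1)).toNat s (s + 1) idx rfl]
    by_cases h1 : s = i ∧ s + 1 ≤ j ∧ j < n
    · rw [if_pos h1]
      simp only
      rw [if_pos (by omega)]
      obtain ⟨rfl, _, _⟩ := h1
      have hz : (s * (s - 1) - s * (s - 1)) = 0 := by ring
      rw [hz]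
      norm_num
      omega
    · rw [if_neg h1]
      simp only
      rw [ih (s + 1) (idx + max 0 (n - (s + 1))) (by omega)]
      by_cases h2 : s + 1 ≤ i ∧ i < j ∧ j < n
      · rw [if_pos h2, if_pos (by omega)]
        have hmax : max 0 (n - (s + 1)) = n - s - 1 := by omega
        rw [hmax]
        -- handle the two exact divisions by 2
        have heven : ∃ c : Int, i * (i - 1) - (s + 1) * (s + 1 - 1) = 2 * c := by
          obtain ⟨c1, hc1⟩ := Int.even_mul_succ_self (i - 1)
          obtain ⟨c2, hc2⟩ := Int.even_mul_succ_self s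
          exact ⟨c1 - c2, by linear_combination hc1 - hc2⟩
        obtain ⟨c, hc⟩ := heven
        have hc2 : i * (i - 1) - s * (s - 1) = 2 * (c + s) := by linear_combination hc
        rw [hc, hc2]
        have d1 : (2 * c) / 2 = c := by omega
        have d2 : (2 * (c + s)) / 2 = c + s := by omega
        rw [d1, d2]
        ring
      · rw [if_neg h2, if_neg (by omega)]

theorem arc_index_closed (i j n : Int) :
    arc_index i j n = arc_index_alt i j n := by
  unfold arc_index arc_index_alt
  rw [arcOuter_spec i j n (n - 0).toNat 0 0 rfl]
  rw [PySem.Int.floordiv_eq_ediv_of_pos (by norm_num)]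
  by_cases h : 0 ≤ i ∧ i < j ∧ j < n
  · rw [if_pos h, if_pos h]
    ring_nf
  · rw [if_neg h, if_neg h]

-- ===== VERDICT (by name: the statement is the Claim_ definition above) =====
theorem arc_index_spec : Claim_equal_arc_index := by
  intro i j n _
  exact arc_index_closed i j n
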